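-- pv_equiv track=rewrite | github.com/itspaulyg/advent-of-code-21 | day10/part1.py | corruption
-- ===== SOURCE A (Python) =====
-- OPEN={'(','{','[','<'}
--
-- CLOSE={')','}',']','>'}
--
-- MAPPING={'(':')', '[':']', '{':'}', '<':'>'}
--
-- def corruption(line):
--
--     syntax = []
--     for char in line:
--         if char in OPEN:
--             syntax.append(char)
--         if char in CLOSE:
--             if syntax:
--                 check = syntax.pop(-1)
--                 if MAPPING[check] == char:
--                     continue
--                 return char
--             else:
--                 return char
-- ===== SOURCE B (Python) =====
-- CLOSE = ')]}>'
--
-- def corruption(line):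
--     # Collapse adjacent matched bracket pairs until stable, then report the
--     # first surviving closing bracket (None if the line is merely incomplete).
--     s = ''.join(c for c in line if c in '()[]{}<>')
--     while True:
--         t = s.replace('()', '').replace('[]', '').replace('{}', '').replace('<>', '')
--         if t == s:
--             break
--         s = t
--     for c in s:
--         if c in CLOSE:
--             return c
--     return None
-- ===== Notes on version B (the rewrite author's own statement) =====
-- stated objective: alternative
-- what changed: A's single left-to-right pass with an explicit stack is replaced by repeatedly deleting every adjacent matched bracket pair (one chained str.replace pass per iteration) until the string stops changing, then returning its first surviving closing bracket.
import Mathlib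
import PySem

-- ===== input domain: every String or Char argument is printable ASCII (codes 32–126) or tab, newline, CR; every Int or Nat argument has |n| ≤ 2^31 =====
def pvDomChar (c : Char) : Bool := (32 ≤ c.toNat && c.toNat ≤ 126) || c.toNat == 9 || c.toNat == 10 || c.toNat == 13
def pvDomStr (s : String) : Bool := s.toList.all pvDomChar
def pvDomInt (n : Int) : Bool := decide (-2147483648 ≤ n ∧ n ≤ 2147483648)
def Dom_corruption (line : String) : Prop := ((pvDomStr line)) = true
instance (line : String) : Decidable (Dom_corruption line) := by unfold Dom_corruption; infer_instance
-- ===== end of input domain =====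

-- B replaces A's single stack pass by repeatedly deleting adjacent matched bracket
-- pairs until the line is stable, then reporting its first surviving closer
-- (objective: alternative strategy, same return value; no argument is mutated).

-- ===== PORT A =====
-- the module constants: sets OPEN/CLOSE and the dict MAPPING
def OPEN_A : List Char := ['(', '{', '[', '<']
def CLOSE_A : List Char := [')', '}', ']', '>']
def MAPPING_A : PySem.Dict Char Char := PySem.Dict.ofList [('(', ')'), ('[', ']'), ('{', '}'), ('<', '>')]

-- A's for-loop; state = the `syntax` stack (append / pop(-1) at the right end)
def runA : List Char → List Char → Option Char
  | [], _ => none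
  | c :: cs, syn =>
    let syn1 := if OPEN_A.contains c then syn ++ [c] else syn   -- if char in OPEN: syntax.append(char)
    if CLOSE_A.contains c then
      match syn1.getLast? with                                  -- if syntax: check = syntax.pop(-1)
      | some check =>
        match PySem.Dict.get? MAPPING_A check with
        | some m => if m = c then runA cs syn1.dropLast else some c
        | none => some c   -- unreachable: the stack only ever holds members of OPEN, all keys of MAPPING
      | none => some c                                          -- else: return char
    else runA cs syn1

def corruption (line : String) : Option String :=
  match runA line.toList [] with
  | some c => some (String.ofList [c])
  | none => none

-- ===== PORT B =====
def BRACKETS : List Char := ['(', ')', '[', ']', '{', '}', '<', '>']  -- the literal '()[]{}<>'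
def CLOSE_B : List Char := [')', ']', '}', '>']                       -- the literal ')]}>'

-- one s.replace(o+d, '') pass for a two-character pattern (left to right, non-overlapping)
def rp (o d : Char) : List Char → List Char
  | [] => []
  | [a] => [a]
  | a :: b :: t => if a = o ∧ b = d then rp o d t else a :: rp o d (b :: t)

-- the four chained .replace(..., '') of one loop iteration
def passB (s : List Char) : List Char :=
  rp '<' '>' (rp '{' '}' (rp '[' ']' (rp '(' ')' s)))

-- length facts cited by reduceB's decreasing_by (a pass that changes the list shortens it)
lemma rp_length (o d : Char) : ∀ s : List Char, (rp o d s).length ≤ s.length := by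
  intro s
  induction s using rp.induct o d with
  | case1 => simp [rp]
  | case2 a => simp [rp]
  | case3 a b t h ih => simp [rp, h]; omega
  | case4 a b t h ih => simp [rp, h]; simpa using ih

lemma rp_eq_of_length (o d : Char) : ∀ s : List Char, (rp o d s).length = s.length → rp o d s = s := by
  intro s
  induction s using rp.induct o d with
  | case1 => simp [rp]
  | case2 a => simp [rp]
  | case3 a b t h ih =>
    intro hl
    exfalso
    have := rp_length o d t
    simp [rp, h] at hl
    omega
  | case4 a b t h ih =>
    intro hl
    simp [rp, h] at hl ⊢
    exact ih (by simpa using hl)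

lemma passB_parts_eq (s : List Char) (h : (passB s).length = s.length) :
    rp '(' ')' s = s ∧ rp '[' ']' s = s ∧ rp '{' '}' s = s ∧ rp '<' '>' s = s := by
  have l1 := rp_length '(' ')' s
  have l2 := rp_length '[' ']' (rp '(' ')' s)
  have l3 := rp_length '{' '}' (rp '[' ']' (rp '(' ')' s))
  have l4 := rp_length '<' '>' (rp '{' '}' (rp '[' ']' (rp '(' ')' s)))
  unfold passB at h
  have e1 : rp '(' ')' s = s := rp_eq_of_length _ _ _ (by omega)
  rw [e1] at l2 l3 l4 h
  have e2 : rp '[' ']' s = s := rp_eq_of_length _ _ _ (by omega)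
  rw [e2] at l3 l4 h
  have e3 : rp '{' '}' s = s := rp_eq_of_length _ _ _ (by omega)
  rw [e3] at l4 h
  have e4 : rp '<' '>' s = s := rp_eq_of_length _ _ _ (by omega)
  exact ⟨e1, e2, e3, e4⟩

lemma passB_lt_of_ne (s : List Char) (h : ¬ passB s = s) : (passB s).length < s.length := by
  have hle : (passB s).length ≤ s.length := by
    unfold passB
    have l1 := rp_length '(' ')' s
    have l2 := rp_length '[' ']' (rp '(' ')' s)
    have l3 := rp_length '{' '}' (rp '[' ']' (rp '(' ')' s))
    have l4 := rp_length '<' '>' (rp '{' '}' (rp '[' ']' (rp '(' ')' s)))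
    omega
  rcases lt_or_eq_of_le hle with hlt | heq
  · exact hlt
  · exfalso
    obtain ⟨e1, e2, e3, e4⟩ := passB_parts_eq s heq
    exact h (by unfold passB; rw [e1, e2, e3, e4])

-- the while loop: collapse until nothing changes
def reduceB (s : List Char) : List Char :=
  if h : passB s = s then s else reduceB (passB s)
termination_by s.length
decreasing_by exact passB_lt_of_ne s h

def corruption_alt (line : String) : Option String :=
  let s := line.toList.filter (fun c => BRACKETS.contains c)
  let nf := reduceB s
  match nf.find? (fun c => CLOSE_B.contains c) with   -- for c in s: if c in CLOSE: return c
  | some c => some (String.ofList [c])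
  | none => none

-- ===== PRECONDITION & SPEC =====
def Spec_corruption (line : String) (out : Option String) : Prop := out = corruption_alt line
instance (line : String) (out : Option String) : Decidable (Spec_corruption line out) := by unfold Spec_corruption; infer_instance

-- ===== CLAIM (what is proved, stated in full; the proofs are below) =====
def Claim_equal_corruption : Prop := ∀ (line : String), Dom_corruption line → Spec_corruption line (corruption line)

-- ===== LEMMAS AND PROOFS =====

-- stepping runA over one kept character only looks at that character; tails may be exchanged
lemma runA_cons_congr (c : Char) (xs ys : List Char) (h : ∀ st, runA xs st = runA ys st) :
    ∀ st, runA (c :: xs) st = runA (c :: ys) st := by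
  intro st
  simp only [runA]
  split
  · split
    · split
      · split
        · exact h _
        · rfl
      · rfl
    · rfl
  · exact h _

-- non-bracket characters are skipped by A
lemma runA_filter : ∀ (s : List Char) (st : List Char),
    runA (s.filter (fun c => BRACKETS.contains c)) st = runA s st := by
  intro s
  induction s with
  | nil => intro st; rfl
  | cons c cs ih =>
    intro st
    by_cases hb : BRACKETS.contains c = true
    · rw [List.filter_cons_of_pos hb]
      exact runA_cons_congr c _ cs ih st
    · rw [List.filter_cons_of_neg hb]
      have ho : c ∉ OPEN_A := by
        revert hb; simp [BRACKETS, OPEN_A]; tauto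
      have hc : c ∉ CLOSE_A := by
        revert hb; simp [BRACKETS, CLOSE_A]; tauto
      rw [ih st]
      simp [runA, ho, hc]

-- deleting one kind of adjacent matched pair does not change A's verdict
lemma runA_rp (o d : Char) (ho : o ∈ OPEN_A) (hoc : o ∉ CLOSE_A)
    (hd : d ∈ CLOSE_A) (hdo : d ∉ OPEN_A)
    (hm : PySem.Dict.get? MAPPING_A o = some d) :
    ∀ s st, runA (rp o d s) st = runA s st := by
  intro s
  induction s using rp.induct o d with
  | case1 => intro st; rfl
  | case2 a => intro st; rfl
  | case3 a b t h ih =>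
    intro st
    obtain ⟨rfl, rfl⟩ := h
    rw [show rp a b (a :: b :: t) = rp a b t by simp [rp]]
    rw [ih st]
    simp [runA, ho, hoc, hd, hdo, hm]
  | case4 a b t h ih =>
    intro st
    rw [show rp o d (a :: b :: t) = a :: rp o d (b :: t) by simp [rp, h]]
    exact runA_cons_congr a _ (b :: t) ih st

lemma runA_pass (s : List Char) (st : List Char) : runA (passB s) st = runA s st := by
  unfold passB
  rw [runA_rp '<' '>' (by decide) (by decide) (by decide) (by decide) (by decide),
      runA_rp '{' '}' (by decide) (by decide) (by decide) (by decide) (by decide),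
      runA_rp '[' ']' (by decide) (by decide) (by decide) (by decide) (by decide),
      runA_rp '(' ')' (by decide) (by decide) (by decide) (by decide) (by decide)]

lemma runA_reduce : ∀ (s : List Char) (st : List Char), runA (reduceB s) st = runA s st := by
  intro s
  induction s using reduceB.induct with
  | case1 s h =>
    intro st; rw [reduceB, dif_pos h]
  | case2 s h ih =>
    intro st; rw [reduceB, dif_neg h, ih st, runA_pass]

lemma reduceB_fix : ∀ s : List Char, passB (reduceB s) = reduceB s := by
  intro s
  induction s using reduceB.induct with
  | case1 s h => rw [reduceB, dif_pos h]; exact h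
  | case2 s h ih => rw [reduceB, dif_neg h]; exact ih

lemma rp_subset (o d : Char) : ∀ s : List Char, ∀ c ∈ rp o d s, c ∈ s := by
  intro s
  induction s using rp.induct o d with
  | case1 => simp [rp]
  | case2 a => simp [rp]
  | case3 a b t h ih =>
    obtain ⟨rfl, rfl⟩ := h
    intro c hc
    rw [show rp a b (a :: b :: t) = rp a b t by simp [rp]] at hc
    exact List.mem_cons_of_mem _ (List.mem_cons_of_mem _ (ih c hc))
  | case4 a b t h ih =>
    intro c hc
    rw [show rp o d (a :: b :: t) = a :: rp o d (b :: t) by simp [rp, h]] at hc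
    rcases List.mem_cons.mp hc with rfl | hc
    · exact List.mem_cons_self
    · exact List.mem_cons_of_mem _ (ih c hc)

lemma passB_subset (s : List Char) : ∀ c ∈ passB s, c ∈ s := by
  intro c hc
  exact rp_subset _ _ _ _ (rp_subset _ _ _ _ (rp_subset _ _ _ _ (rp_subset _ _ _ _ hc)))

lemma reduceB_subset : ∀ s : List Char, ∀ c ∈ reduceB s, c ∈ s := by
  intro s
  induction s using reduceB.induct with
  | case1 s h => rw [reduceB, dif_pos h]; exact fun c hc => hc
  | case2 s h ih =>
    rw [reduceB, dif_neg h]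
    exact fun c hc => passB_subset s c (ih c hc)

-- a string fixed by rp o d has no adjacent pair o,d — head and tail extraction
lemma rp_fix_head (o d : Char) (t : List Char) : rp o d (o :: d :: t) ≠ o :: d :: t := by
  intro h
  rw [show rp o d (o :: d :: t) = rp o d t by simp [rp]] at h
  have := rp_length o d t
  have hl := congrArg List.length h
  simp at hl
  omega

lemma rp_fix_tail (o d a : Char) (s : List Char) (h : rp o d (a :: s) = a :: s) :
    rp o d s = s := by
  cases s with
  | nil => rfl
  | cons b t =>
    by_cases hp : a = o ∧ b = d
    · obtain ⟨rfl, rfl⟩ := hp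
      exact absurd h (rp_fix_head a b t)
    · rw [show rp o d (a :: b :: t) = a :: rp o d (b :: t) by simp [rp, hp]] at h
      exact (List.cons.injEq _ _ _ _ ▸ h).2

-- every opener is a key of MAPPING
lemma map_total : ∀ o ∈ OPEN_A, ∃ m, PySem.Dict.get? MAPPING_A o = some m := by
  intro o ho
  simp only [OPEN_A, List.mem_cons, List.not_mem_nil, or_false] at ho
  rcases ho with rfl | rfl | rfl | rfl
  · exact ⟨')', by decide⟩
  · exact ⟨'}', by decide⟩
  · exact ⟨']', by decide⟩
  · exact ⟨'>', by decide⟩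

-- after pushing opener c, the new stack top cannot match the next character
-- (the pair would have been collapsed by rp c d)
lemma opener_boundary (c d : Char) (cs st : List Char)
    (hcd : PySem.Dict.get? MAPPING_A c = some d)
    (hpair : rp c d (c :: cs) = c :: cs) :
    ∀ o, (st ++ [c]).getLast? = some o → ∀ b, cs.head? = some b →
      PySem.Dict.get? MAPPING_A o ≠ some b := by
  intro o hgo b hb hgb
  rw [List.getLast?_concat, Option.some.injEq] at hgo
  subst hgo
  rw [hcd, Option.some.injEq] at hgb
  subst hgb
  cases cs with
  | nil => simp at hb
  | cons b' t =>
    simp only [List.head?_cons, Option.some.injEq] at hb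
    subst hb
    exact rp_fix_head c b' t hpair

-- pushed stacks still hold only openers
lemma stack_push (c : Char) (st : List Char) (hstO : ∀ x ∈ st, x ∈ OPEN_A)
    (hc : c ∈ OPEN_A) : ∀ x ∈ st ++ [c], x ∈ OPEN_A := by
  intro x hx
  rcases List.mem_append.mp hx with h | h
  · exact hstO x h
  · simp only [List.mem_singleton] at h
    subst h; exact hc

-- key lemma: on an all-bracket string with no adjacent matched pair, A's stack run
-- returns exactly the first closing bracket (stack top never matching the head)
lemma runA_normal : ∀ (s : List Char) (st : List Char),
    (∀ c ∈ s, c ∈ BRACKETS) →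
    rp '(' ')' s = s → rp '[' ']' s = s → rp '{' '}' s = s → rp '<' '>' s = s →
    (∀ c ∈ st, c ∈ OPEN_A) →
    (∀ o, st.getLast? = some o → ∀ b, s.head? = some b → PySem.Dict.get? MAPPING_A o ≠ some b) →
    runA s st = s.find? (fun c => CLOSE_B.contains c) := by
  intro s
  induction s with
  | nil => intro st _ _ _ _ _ _ _; rfl
  | cons c cs ih =>
    intro st hB h1 h2 h3 h4 hstO hbd
    have hc : c ∈ BRACKETS := hB c List.mem_cons_self
    have hBt : ∀ x ∈ cs, x ∈ BRACKETS := fun x hx => hB x (List.mem_cons_of_mem _ hx)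
    simp only [BRACKETS, List.mem_cons, List.not_mem_nil, or_false] at hc
    rcases hc with rfl | rfl | rfl | rfl | rfl | rfl | rfl | rfl
    · -- '('
      rw [List.find?_cons_of_neg (by decide),
          show runA ('(' :: cs) st = runA cs (st ++ ['(']) from by
            simp [runA, (by decide : '(' ∈ OPEN_A), (by decide : '(' ∉ CLOSE_A)]]
      exact ih (st ++ ['(']) hBt (rp_fix_tail _ _ _ _ h1) (rp_fix_tail _ _ _ _ h2)
        (rp_fix_tail _ _ _ _ h3) (rp_fix_tail _ _ _ _ h4)
        (stack_push _ _ hstO (by decide)) (opener_boundary '(' ')' cs st (by decide) h1)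
    · -- ')'
      rw [List.find?_cons_of_pos (by decide)]
      have hop : ')' ∉ OPEN_A := by decide
      have hcl : ')' ∈ CLOSE_A := by decide
      cases hgl : st.getLast? with
      | none => simp [runA, hop, hcl, hgl]
      | some o =>
        obtain ⟨m, hm⟩ := map_total o (hstO o (List.mem_of_getLast? hgl))
        have hmc : m ≠ ')' := fun e => hbd o hgl ')' rfl (e ▸ hm)
        simp [runA, hop, hcl, hgl, hm, hmc]
    · -- '['
      rw [List.find?_cons_of_neg (by decide),
          show runA ('[' :: cs) st = runA cs (st ++ ['[']) from by
            simp [runA, (by decide : '[' ∈ OPEN_A), (by decide : '[' ∉ CLOSE_A)]]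
      exact ih (st ++ ['[']) hBt (rp_fix_tail _ _ _ _ h1) (rp_fix_tail _ _ _ _ h2)
        (rp_fix_tail _ _ _ _ h3) (rp_fix_tail _ _ _ _ h4)
        (stack_push _ _ hstO (by decide)) (opener_boundary '[' ']' cs st (by decide) h2)
    · -- ']'
      rw [List.find?_cons_of_pos (by decide)]
      have hop : ']' ∉ OPEN_A := by decide
      have hcl : ']' ∈ CLOSE_A := by decide
      cases hgl : st.getLast? with
      | none => simp [runA, hop, hcl, hgl]
      | some o =>
        obtain ⟨m, hm⟩ := map_total o (hstO o (List.mem_of_getLast? hgl))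
        have hmc : m ≠ ']' := fun e => hbd o hgl ']' rfl (e ▸ hm)
        simp [runA, hop, hcl, hgl, hm, hmc]
    · -- '{'
      rw [List.find?_cons_of_neg (by decide),
          show runA ('{' :: cs) st = runA cs (st ++ ['{']) from by
            simp [runA, (by decide : '{' ∈ OPEN_A), (by decide : '{' ∉ CLOSE_A)]]
      exact ih (st ++ ['{']) hBt (rp_fix_tail _ _ _ _ h1) (rp_fix_tail _ _ _ _ h2)
        (rp_fix_tail _ _ _ _ h3) (rp_fix_tail _ _ _ _ h4)
        (stack_push _ _ hstO (by decide)) (opener_boundary '{' '}' cs st (by decide) h3)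
    · -- '}'
      rw [List.find?_cons_of_pos (by decide)]
      have hop : '}' ∉ OPEN_A := by decide
      have hcl : '}' ∈ CLOSE_A := by decide
      cases hgl : st.getLast? with
      | none => simp [runA, hop, hcl, hgl]
      | some o =>
        obtain ⟨m, hm⟩ := map_total o (hstO o (List.mem_of_getLast? hgl))
        have hmc : m ≠ '}' := fun e => hbd o hgl '}' rfl (e ▸ hm)
        simp [runA, hop, hcl, hgl, hm, hmc]
    · -- '<'
      rw [List.find?_cons_of_neg (by decide),
          show runA ('<' :: cs) st = runA cs (st ++ ['<']) from by
            simp [runA, (by decide : '<' ∈ OPEN_A), (by decide : '<' ∉ CLOSE_A)]]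
      exact ih (st ++ ['<']) hBt (rp_fix_tail _ _ _ _ h1) (rp_fix_tail _ _ _ _ h2)
        (rp_fix_tail _ _ _ _ h3) (rp_fix_tail _ _ _ _ h4)
        (stack_push _ _ hstO (by decide)) (opener_boundary '<' '>' cs st (by decide) h4)
    · -- '>'
      rw [List.find?_cons_of_pos (by decide)]
      have hop : '>' ∉ OPEN_A := by decide
      have hcl : '>' ∈ CLOSE_A := by decide
      cases hgl : st.getLast? with
      | none => simp [runA, hop, hcl, hgl]
      | some o =>
        obtain ⟨m, hm⟩ := map_total o (hstO o (List.mem_of_getLast? hgl))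
        have hmc : m ≠ '>' := fun e => hbd o hgl '>' rfl (e ▸ hm)
        simp [runA, hop, hcl, hgl, hm, hmc]

-- ===== VERDICT (by name: the statement is the Claim_ definition above) =====
theorem corruption_spec : Claim_equal_corruption := by
  intro line _
  unfold Spec_corruption
  unfold corruption corruption_alt
  have hrun : runA line.toList [] =
      (reduceB (line.toList.filter (fun c => BRACKETS.contains c))).find?
        (fun c => CLOSE_B.contains c) := by
    set bs := line.toList.filter (fun c => BRACKETS.contains c) with hbs
    rw [← runA_filter line.toList [], ← hbs, ← runA_reduce bs []]
    apply runA_normal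
    · intro c hc
      have := reduceB_subset bs c hc
      rw [hbs] at this
      simpa using (List.mem_filter.mp this).2
    · exact (passB_parts_eq _ (congrArg List.length (reduceB_fix bs))).1
    · exact (passB_parts_eq _ (congrArg List.length (reduceB_fix bs))).2.1
    · exact (passB_parts_eq _ (congrArg List.length (reduceB_fix bs))).2.2.1
    · exact (passB_parts_eq _ (congrArg List.length (reduceB_fix bs))).2.2.2
    · intro c hc; simp at hc
    · intro o ho; simp at ho
  rw [hrun]
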